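-- pv_equiv track=rewrite | github.com/pypi-data/pypi-mirror-397 | packages/ctfsolver/ctfsolver-0.0.15-py3-none-any.whl/ctfsolver/find_usage/manager_gathering.py | tabbing
-- ===== SOURCE A (Python) =====
-- def tabbing(text: str, num: int = 1, function=False, space=True, space_num=4):
--     lines = text.split("\n")
--     tab_like = "\t" if not space else " " * space_num
--     for i in range(len(lines)):
--         lines[i] = tab_like * num + lines[i]
--         if function and i == 0:
--             break
--     return "\n".join(lines)
-- ===== SOURCE B (Python) =====
-- def tabbing(text: str, num: int = 1, function=False, space=True, space_num=4):
--     prefix = (" " * space_num if space else "\t") * num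
--     if function:
--         return prefix + text
--     return prefix + text.replace("\n", "\n" + prefix)
-- ===== Notes on version B (the rewrite author's own statement) =====
-- stated objective: simpler
-- what changed: Replaces A's split-into-lines / index-loop-with-break / join pipeline by computing the prefix once and doing a single string.replace of newline with newline+prefix (plain concatenation when function is truthy).
import Mathlib
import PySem

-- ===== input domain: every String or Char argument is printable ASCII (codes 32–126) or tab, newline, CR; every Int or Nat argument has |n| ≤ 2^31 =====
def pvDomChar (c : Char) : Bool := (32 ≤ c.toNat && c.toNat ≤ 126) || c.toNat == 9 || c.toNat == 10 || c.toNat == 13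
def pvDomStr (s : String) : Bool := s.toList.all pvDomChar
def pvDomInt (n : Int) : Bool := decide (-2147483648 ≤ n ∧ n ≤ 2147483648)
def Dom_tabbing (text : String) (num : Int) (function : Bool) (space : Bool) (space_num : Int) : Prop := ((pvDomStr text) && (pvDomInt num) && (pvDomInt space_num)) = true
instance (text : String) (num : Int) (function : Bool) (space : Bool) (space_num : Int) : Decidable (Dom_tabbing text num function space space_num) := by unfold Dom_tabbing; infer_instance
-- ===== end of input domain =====

-- B replaces A's split / index-loop-with-break / join by one computed prefix plus a single
-- string replace (plain concatenation when `function` is truthy); objective: simpler.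

-- Python's 'cs * n' on strings (empty result for n ≤ 0) — exact; PySem has no repeat primitive.
def pyStrMul (cs : List Char) (n : Int) : List Char := (List.replicate n.toNat cs).flatten

-- ===== PORT A =====
-- A's 'for i in range(len(lines)): lines[i] = tab_like*num + lines[i]; if function and i==0: break',
-- ported as the obvious structural recursion over the same lines (stop after the first when function).
def tabbingLoop (tab_like : List Char) (num : Int) (function : Bool) : List (List Char) → List (List Char)
  | [] => []
  | l :: ls =>
    if function then (pyStrMul tab_like num ++ l) :: ls
    else (pyStrMul tab_like num ++ l) :: tabbingLoop tab_like num function ls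

def tabbing (text : String) (num : Int) (function : Bool) (space : Bool) (space_num : Int) : String :=
  let lines := PySem.Chars.splitOn text.toList ['\n']
  let tab_like := if !space then ['\t'] else pyStrMul [' '] space_num
  String.mk (PySem.Chars.join ['\n'] (tabbingLoop tab_like num function lines))

-- ===== PORT B =====
def tabbing_alt (text : String) (num : Int) (function : Bool) (space : Bool) (space_num : Int) : String :=
  let pre := pyStrMul (if space then pyStrMul [' '] space_num else ['\t']) num
  if function then String.mk (pre ++ text.toList)
  else String.mk (pre ++ PySem.Chars.replace text.toList ['\n'] ('\n' :: pre))

-- ===== PRECONDITION & SPEC =====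
def Spec_tabbing (text : String) (num : Int) (function : Bool) (space : Bool) (space_num : Int) (out : String) : Prop := out = tabbing_alt text num function space space_num
instance (text : String) (num : Int) (function : Bool) (space : Bool) (space_num : Int) (out : String) : Decidable (Spec_tabbing text num function space space_num out) := by unfold Spec_tabbing; infer_instance

-- ===== CLAIM (what is proved, stated in full; the proofs are below) =====
def Claim_equal_tabbing : Prop := ∀ (text : String) (num : Int) (function : Bool) (space : Bool) (space_num : Int), Dom_tabbing text num function space space_num → Spec_tabbing text num function space space_num (tabbing text num function space space_num)

-- ===== LEMMAS AND PROOFS =====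

-- simple recursive characterisations of split-on-'\n' and replace-of-'\n'
def pvSplit2 : List Char → List Char → List (List Char)
  | cur, [] => [cur.reverse]
  | cur, c :: t => if c = '\n' then cur.reverse :: pvSplit2 [] t else pvSplit2 (c :: cur) t

def pvRep (new : List Char) : List Char → List Char
  | [] => []
  | c :: t => if c = '\n' then new ++ pvRep new t else c :: pvRep new t

theorem pvSplit2_ne_nil (cur l : List Char) : pvSplit2 cur l ≠ [] := by
  induction l generalizing cur with
  | nil => simp [pvSplit2]
  | cons c t ih => by_cases h : c = '\n' <;> simp [pvSplit2, h, ih]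

theorem splitOn_go_eq (fuel : Nat) (l cur : List Char) (acc : List (List Char)) (h : l.length ≤ fuel) :
    PySem.Chars.splitOn.go ['\n'] fuel l cur acc = acc.reverse ++ pvSplit2 cur l := by
  induction fuel generalizing l cur acc with
  | zero =>
    cases l with
    | nil => simp [PySem.Chars.splitOn.go, pvSplit2]
    | cons c t => simp at h
  | succ fuel ih =>
    cases l with
    | nil => simp [PySem.Chars.splitOn.go, pvSplit2]
    | cons c t =>
      by_cases hc : c = '\n'
      · subst hc
        have := ih t [] (cur.reverse :: acc) (by simpa using Nat.le_of_succ_le_succ h)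
        simp [PySem.Chars.splitOn.go, List.isPrefixOf, pvSplit2] at this ⊢
        simpa using this
      · have := ih t (c :: cur) acc (by simpa using Nat.le_of_succ_le_succ h)
        simp [PySem.Chars.splitOn.go, List.isPrefixOf, pvSplit2, hc, Ne.symm hc] at this ⊢
        simpa using this

theorem splitOn_eq (s : List Char) :
    PySem.Chars.splitOn s ['\n'] = pvSplit2 [] s := by
  have := splitOn_go_eq (s.length + 1) s [] [] (by omega)
  simpa [PySem.Chars.splitOn] using this

theorem replace_go_eq (new : List Char) (fuel : Nat) (l acc : List Char) (h : l.length ≤ fuel) :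
    PySem.Chars.replace.go ['\n'] new fuel l acc = acc.reverse ++ pvRep new l := by
  induction fuel generalizing l acc with
  | zero =>
    cases l with
    | nil => simp [PySem.Chars.replace.go, pvRep]
    | cons c t => simp at h
  | succ fuel ih =>
    cases l with
    | nil => simp [PySem.Chars.replace.go, pvRep]
    | cons c t =>
      by_cases hc : c = '\n'
      · subst hc
        have := ih t (new.reverse ++ acc) (by simpa using Nat.le_of_succ_le_succ h)
        simp [PySem.Chars.replace.go, List.isPrefixOf, pvRep] at this ⊢
        simpa using this
      · have := ih t (c :: acc) (by simpa using Nat.le_of_succ_le_succ h)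
        simp [PySem.Chars.replace.go, List.isPrefixOf, pvRep, hc, Ne.symm hc] at this ⊢
        simpa using this

theorem replace_eq (s new : List Char) :
    PySem.Chars.replace s ['\n'] new = pvRep new s := by
  simpa [PySem.Chars.replace] using replace_go_eq new s.length s [] (le_refl _)

-- join of a list whose head got a prefix
theorem join_head_prefix (p h : List Char) (t : List (List Char)) :
    PySem.Chars.join ['\n'] ((p ++ h) :: t) = p ++ PySem.Chars.join ['\n'] (h :: t) := by
  cases t with
  | nil => simp [PySem.Chars.join_singleton]
  | cons b rest =>
    rw [PySem.Chars.join_cons_cons, PySem.Chars.join_cons_cons]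
    simp

theorem join_split2 (l cur : List Char) :
    PySem.Chars.join ['\n'] (pvSplit2 cur l) = cur.reverse ++ l := by
  induction l generalizing cur with
  | nil => simp [pvSplit2, PySem.Chars.join_singleton]
  | cons c t ih =>
    by_cases hc : c = '\n'
    · subst hc
      have hne := pvSplit2_ne_nil [] t
      obtain ⟨b, rest, hbt⟩ := List.exists_cons_of_ne_nil hne
      simp only [pvSplit2, eq_self_iff_true, if_true, hbt, PySem.Chars.join_cons_cons]
      have := ih (cur := [])
      rw [hbt] at this
      rw [this]
      simp
    · simp only [pvSplit2, if_neg hc, ih]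
      simp

theorem join_map_split2 (p : List Char) (l cur : List Char) :
    PySem.Chars.join ['\n'] ((pvSplit2 cur l).map (p ++ ·)) =
      p ++ cur.reverse ++ pvRep ('\n' :: p) l := by
  induction l generalizing cur with
  | nil => simp [pvSplit2, pvRep, PySem.Chars.join_singleton]
  | cons c t ih =>
    by_cases hc : c = '\n'
    · subst hc
      have hne := pvSplit2_ne_nil [] t
      obtain ⟨b, rest, hbt⟩ := List.exists_cons_of_ne_nil hne
      have hmap : (pvSplit2 [] t).map (p ++ ·) = (p ++ b) :: rest.map (p ++ ·) := by
        rw [hbt]; simp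
      simp only [pvSplit2, eq_self_iff_true, if_true, pvRep, List.map_cons, hmap,
        PySem.Chars.join_cons_cons]
      have := ih (cur := [])
      rw [hmap] at this
      rw [this]
      simp
    · simp only [pvSplit2, if_neg hc, pvRep, ih]
      simp

theorem loop_false (tab_like : List Char) (num : Int) (ls : List (List Char)) :
    tabbingLoop tab_like num false ls = ls.map (pyStrMul tab_like num ++ ·) := by
  induction ls with
  | nil => rfl
  | cons l ls ih => simp [tabbingLoop, ih]

-- ===== VERDICT (by name: the statement is the Claim_ definition above) =====
theorem tabbing_spec : Claim_equal_tabbing := by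
  intro text num function space space_num _
  unfold Spec_tabbing tabbing tabbing_alt
  have hpre : (if !space then ['\t'] else pyStrMul [' '] space_num) =
      (if space then pyStrMul [' '] space_num else ['\t']) := by
    cases space <;> rfl
  rw [splitOn_eq, hpre]
  set p := pyStrMul (if space then pyStrMul [' '] space_num else ['\t']) num with hp
  cases function with
  | false =>
    simp only [Bool.false_eq_true, if_false]
    rw [loop_false, join_map_split2, replace_eq]
    rw [← hp]
    simp
  | true =>
    
    have hne := pvSplit2_ne_nil [] text.toList
    obtain ⟨h, t, hbt⟩ := List.exists_cons_of_ne_nil hne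
    rw [hbt]
    show String.mk (PySem.Chars.join ['\n'] ((p ++ h) :: t)) = _
    rw [join_head_prefix]
    have := join_split2 text.toList []
    rw [hbt] at this
    rw [this]
    simp
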